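-- pv_equiv track=rewrite | github.com/manwar/perlweeklychallenge-club | challenge-198/roger-bell-west/python/ch-1.py | maxgap
-- ===== SOURCE A (Python) =====
-- from itertools import tee
--
-- def maxgap(l0):
--   if len(l0) < 2:
--     return 0
--   l = l0
--   l.sort()
--   q = []
--   j, k = tee(l)
--   next(k, None)
--   for i in zip(j, k):
--     q.append(i[1] - i[0])
--   qm = max(q)
--   return len([i for i in q if i == qm])
-- ===== SOURCE B (Python) =====
-- def maxgap(l0):
--   l0.sort()
--   if len(l0) < 2:
--     return 0
--   best = l0[1] - l0[0]
--   cnt = 1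
--   for i in range(2, len(l0)):
--     gap = l0[i] - l0[i - 1]
--     if gap > best:
--       best = gap
--       cnt = 1
--     elif gap == best:
--       cnt += 1
--   return cnt
-- ===== Notes on version B (the rewrite author's own statement) =====
-- stated objective: simpler
-- what changed: Replaces building the explicit gap list plus two separate scans (max, then filter/count) by a single pass over consecutive sorted elements maintaining the running maximum gap and its count.
import Mathlib
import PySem

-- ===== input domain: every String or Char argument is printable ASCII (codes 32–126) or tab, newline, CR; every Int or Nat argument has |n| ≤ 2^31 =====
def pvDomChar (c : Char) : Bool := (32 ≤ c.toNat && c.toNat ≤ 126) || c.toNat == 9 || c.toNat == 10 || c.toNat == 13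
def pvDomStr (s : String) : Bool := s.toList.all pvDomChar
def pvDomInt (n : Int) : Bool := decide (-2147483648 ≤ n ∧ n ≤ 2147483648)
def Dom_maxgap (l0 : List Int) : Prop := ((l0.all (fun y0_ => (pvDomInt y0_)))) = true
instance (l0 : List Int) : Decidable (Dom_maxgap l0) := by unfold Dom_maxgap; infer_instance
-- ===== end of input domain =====

-- B folds the gap-list construction and the two max/count scans of A into one pass
-- over consecutive sorted elements maintaining the running maximum gap and its count (simpler).
-- Note: both A and B sort the argument list in place; the equivalence proved here is about the return value.


-- ===== PORT A =====
def maxgap (l0 : List Int) : Int :=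
  if l0.length < 2 then 0
  else
    -- l = l0; l.sort()
    let l := PySem.List.sorted l0 (fun x => x) false
    -- j, k = tee(l); next(k, None); for i in zip(j, k): q.append(i[1] - i[0])
    let q := (l.zip (l.drop 1)).foldl (fun acc i => acc ++ [i.2 - i.1]) []
    -- qm = max(q)  (q is nonempty here since len(l0) ≥ 2)
    match PySem.List.max? q (fun x => x) with
    | some qm => ((q.filter (fun i => i == qm)).length : Int)
    | none => 0   -- unreachable under the length guard

-- ===== PORT B =====
-- the for-loop of Source B: walk the remaining sorted elements carrying (prev, best, cnt)
def maxgapGo (prev best cnt : Int) : List Int → Int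
  | [] => cnt
  | x :: xs =>
    let gap := x - prev
    if gap > best then maxgapGo x gap 1 xs
    else if gap = best then maxgapGo x best (cnt + 1) xs
    else maxgapGo x best cnt xs

def maxgap_alt (l0 : List Int) : Int :=
  match PySem.List.sorted l0 (fun x => x) false with
  | a :: b :: rest => maxgapGo b (b - a) 1 rest
  | _ => 0

-- ===== PRECONDITION & SPEC =====
def Spec_maxgap (l0 : List Int) (out : Int) : Prop := out = maxgap_alt l0
instance (l0 : List Int) (out : Int) : Decidable (Spec_maxgap l0 out) := by unfold Spec_maxgap; infer_instance

-- ===== CLAIM (what is proved, stated in full; the proofs are below) =====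
def Claim_equal_maxgap : Prop := ∀ (l0 : List Int), Dom_maxgap l0 → Spec_maxgap l0 (maxgap l0)

-- ===== LEMMAS AND PROOFS =====

-- the list of consecutive differences, starting from a previous element
def gapsOf (prev : Int) : List Int → List Int
  | [] => []
  | x :: xs => (x - prev) :: gapsOf x xs

theorem foldl_zip_gaps (xs : List Int) : ∀ (prev : Int) (acc : List Int),
    (((prev :: xs).zip xs).foldl (fun acc i => acc ++ [i.2 - i.1]) acc) = acc ++ gapsOf prev xs := by
  induction xs with
  | nil => intro prev acc; simp [gapsOf]
  | cons x xs ih =>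
    intro prev acc
    simp only [List.zip_cons_cons, List.foldl_cons, gapsOf, ih]
    simp

-- invariant of B's loop: the result counts the occurrences of the overall maximum
theorem maxgapGo_eq (xs : List Int) : ∀ (prev best cnt : Int),
    maxgapGo prev best cnt xs =
      ((gapsOf prev xs).count ((gapsOf prev xs).foldl max best) : Int) +
        (if best = (gapsOf prev xs).foldl max best then cnt else 0) := by
  induction xs with
  | nil => intro prev best cnt; simp [maxgapGo, gapsOf]
  | cons x xs ih =>
    intro prev best cnt
    simp only [maxgapGo, gapsOf, List.foldl_cons]
    by_cases h1 : x - prev > best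
    · rw [if_pos h1, ih]
      have hmax : max best (x - prev) = x - prev := by omega
      simp only [hmax]
      have hM : best ≠ (gapsOf x xs).foldl max (x - prev) := by
        have := (PySem.List.le_foldl_max (gapsOf x xs) (x - prev)).1
        omega
      rw [if_neg hM, List.count_cons]
      by_cases h2 : x - prev = (gapsOf x xs).foldl max (x - prev)
      · rw [if_pos h2, if_pos (beq_iff_eq.mpr h2)]
        push_cast; ring
      · rw [if_neg h2, if_neg (by simp only [beq_iff_eq]; omega)]
        push_cast; ring
    · rw [if_neg h1]
      have hmax : max best (x - prev) = best := by omega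
      by_cases h2 : x - prev = best
      · rw [if_pos h2, ih]
        simp only [hmax, List.count_cons]
        by_cases h3 : best = (gapsOf x xs).foldl max best
        · rw [if_pos h3, if_pos (by simp only [beq_iff_eq]; omega), if_pos h3]
          push_cast; ring
        · rw [if_neg h3, if_neg (by simp only [beq_iff_eq]; omega), if_neg h3]
          push_cast; ring
      · rw [if_neg h2, ih]
        simp only [hmax, List.count_cons]
        have hb := (PySem.List.le_foldl_max (gapsOf x xs) best).1
        rw [if_neg (show ¬((x - prev == (gapsOf x xs).foldl max best) = true) by
          simp only [beq_iff_eq]; omega)]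
        push_cast; ring

-- ===== VERDICT (by name: the statement is the Claim_ definition above) =====
theorem maxgap_spec : Claim_equal_maxgap := by
  intro l0 _
  unfold Spec_maxgap maxgap maxgap_alt
  by_cases hlen : l0.length < 2
  · rw [if_pos hlen]
    match hs : PySem.List.sorted l0 (fun x => x) false with
    | [] => rfl
    | [a] => rfl
    | a :: b :: rest =>
      exfalso
      have := PySem.List.length_sorted l0 (fun x => x) false
      rw [hs] at this
      simp at this; omega
  · rw [if_neg hlen]
    match hs : PySem.List.sorted l0 (fun x => x) false with
    | [] =>
      exfalso
      have := PySem.List.length_sorted l0 (fun x => x) false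
      rw [hs] at this; simp at this; omega
    | [a] =>
      exfalso
      have := PySem.List.length_sorted l0 (fun x => x) false
      rw [hs] at this; simp at this; omega
    | a :: b :: rest =>
      simp only
      have hq : ((a :: b :: rest).zip ((a :: b :: rest).drop 1)).foldl
          (fun acc i => acc ++ [i.2 - i.1]) [] = gapsOf a (b :: rest) := by
        simpa using foldl_zip_gaps (b :: rest) a []
      rw [hq]
      have hgaps : gapsOf a (b :: rest) = (b - a) :: gapsOf b rest := rfl
      rw [hgaps, PySem.List.max?_id_cons]
      simp only
      rw [maxgapGo_eq]
      set M := (gapsOf b rest).foldl max (b - a) with hM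
      have hfilter : ((((b - a) :: gapsOf b rest).filter (fun i => i == M)).length : Int)
          = (((b - a) :: gapsOf b rest).count M : Int) := by
        rw [List.count, List.countP_eq_length_filter]
      rw [hfilter, List.count_cons]
      by_cases h : b - a = M
      · rw [if_pos (by simp [h]), if_pos h]
        push_cast; ring
      · rw [if_neg (by simp [h]), if_neg h]
        push_cast; ring
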